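-- pv_equiv track=rewrite | github.com/roangws/IEEE | article_refiner.py | _format_unused_sources
-- ===== SOURCE A (Python) =====
-- from typing import Dict, List, Tuple, Optional
--
-- def _format_unused_sources(
--
--     unused_nums: List[int],
--     sources_list: List[Dict],
--     citation_map: Dict[str, int],
--     metadata: Optional[Dict] = None
-- ) -> str:
--     """Format unused sources for the prompt."""
--     if not unused_nums:
--         return "All sources have been used."
--
--     # Reverse citation map
--     num_to_file = {v: k for k, v in citation_map.items()}
--
--     lines = []
--     for num in unused_nums[:35]:  # Give the model enough options to actually integrate
--         filename = num_to_file.get(num, "unknown")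
--
--         # Get metadata
--         if metadata:
--             meta = metadata.get(filename, {})
--             title = meta.get('title') or filename
--             title = title[:80]
--         else:
--             title = filename[:80]
--
--         # Get sample text from sources
--         sample_text = ""
--         for source in sources_list:
--             if source.get('filename') == filename:
--                 chunk = source.get('chunk_text', '')[:200]
--                 sample_text = chunk.replace('\n', ' ').strip()
--                 break
--
--         lines.append(f"[{num}] {title}")
--         if sample_text:
--             lines.append(f"    Context: {sample_text}...")
--
--     if len(unused_nums) > 35:
--         lines.append(f"\n... and {len(unused_nums) - 35} more unused sources")
--
--     return '\n'.join(lines)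
-- ===== SOURCE B (Python) =====
-- from typing import Dict, List, Tuple, Optional
--
-- def _format_unused_sources(
--     unused_nums: List[int],
--     sources_list: List[Dict],
--     citation_map: Dict[str, int],
--     metadata: Optional[Dict] = None
-- ) -> str:
--     """Format unused sources (recursive string builder over a prebuilt sample index)."""
--     if not unused_nums:
--         return "All sources have been used."
--
--     num_to_file = {v: k for k, v in citation_map.items()}
--
--     # One pass over sources_list: first-occurrence processed sample per filename.
--     sample_by_file = {}
--     for source in sources_list:
--         fname = source.get('filename')
--         if fname is not None and fname not in sample_by_file:
--             sample_by_file[fname] = source.get('chunk_text', '')[:200].replace('\n', ' ').strip()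
--
--     def block(num):
--         filename = num_to_file.get(num, "unknown")
--         if metadata:
--             title = (metadata.get(filename, {}).get('title') or filename)[:80]
--         else:
--             title = filename[:80]
--         sample = sample_by_file.get(filename, '')
--         head = f"[{num}] {title}"
--         return head + f"\n    Context: {sample}..." if sample else head
--
--     def rec(nums):
--         # nums is nonempty; build the report back-to-front by direct concatenation
--         if len(nums) == 1:
--             return block(nums[0])
--         return block(nums[0]) + "\n" + rec(nums[1:])
--
--     text = rec(unused_nums[:35])
--     if len(unused_nums) > 35:
--         text += f"\n\n... and {len(unused_nums) - 35} more unused sources"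
--     return text
-- ===== Notes on version B (the rewrite author's own statement) =====
-- stated objective: alternative
-- what changed: B builds a filename->first-sample index in one preprocessing pass instead of rescanning sources_list per number, and replaces A's lines-list-then-join loop with a recursive function that concatenates each entry's block string (head plus optional context) directly, appending the overflow tail by string addition.
import Mathlib
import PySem

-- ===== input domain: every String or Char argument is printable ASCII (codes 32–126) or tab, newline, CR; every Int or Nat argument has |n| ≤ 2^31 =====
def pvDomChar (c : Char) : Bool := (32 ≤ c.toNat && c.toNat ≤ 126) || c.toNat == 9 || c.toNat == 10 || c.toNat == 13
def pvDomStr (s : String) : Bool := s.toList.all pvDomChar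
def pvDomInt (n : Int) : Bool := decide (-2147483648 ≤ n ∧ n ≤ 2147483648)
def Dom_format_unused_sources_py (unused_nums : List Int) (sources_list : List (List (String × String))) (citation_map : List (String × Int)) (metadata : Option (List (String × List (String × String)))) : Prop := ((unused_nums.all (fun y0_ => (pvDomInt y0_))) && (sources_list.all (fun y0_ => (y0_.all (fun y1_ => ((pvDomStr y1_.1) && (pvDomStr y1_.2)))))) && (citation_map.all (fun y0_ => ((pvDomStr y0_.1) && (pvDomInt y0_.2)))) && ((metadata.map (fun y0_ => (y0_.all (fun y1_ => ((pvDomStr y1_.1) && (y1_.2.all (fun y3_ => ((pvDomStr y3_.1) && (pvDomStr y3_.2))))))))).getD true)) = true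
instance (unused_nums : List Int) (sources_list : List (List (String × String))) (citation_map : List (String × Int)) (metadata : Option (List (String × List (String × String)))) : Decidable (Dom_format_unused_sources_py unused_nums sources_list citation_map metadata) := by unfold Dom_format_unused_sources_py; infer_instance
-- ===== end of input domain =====

-- B builds a filename → first-sample index in one pass instead of rescanning sources_list per
-- number, and assembles the report by a recursive string builder (block text concatenated with
-- '\n') instead of A's lines-list-plus-join loop; same return value.

-- ===== PORT A =====
-- shared with port B: both Pythons contain these identical expressions
-- dict.get on an association-list-encoded dict argument (first match)
def pvLookup {α : Type} : List (String × α) → String → Option α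
  | [], _ => none
  | (k, v) :: rest, key => if k == key then some v else pvLookup rest key

-- chunk_text[:200].replace('\n', ' ').strip()
def pvProc (chunk : String) : String :=
  PySem.Str.strip (PySem.Str.replace (PySem.Str.slice chunk none (some 200)) "\n" " ")

-- num_to_file = {v: k for k, v in citation_map.items()}
def pvNumToFile (citation_map : List (String × Int)) : PySem.Dict Int String :=
  citation_map.foldl (fun d p => d.insert p.2 p.1) PySem.Dict.empty

-- title computation (identical in both Pythons, incl. the truthiness of `if metadata:` and `or`)
def pvTitle (metadata : Option (List (String × List (String × String)))) (filename : String) : String :=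
  match metadata with
  | some m =>
    if m.length ≠ 0 then
      let t := match pvLookup ((pvLookup m filename).getD []) "title" with
        | some t => if t == "" then filename else t
        | none => filename
      PySem.Str.slice t none (some 80)
    else PySem.Str.slice filename none (some 80)
  | none => PySem.Str.slice filename none (some 80)

-- A's inner scan: first source whose 'filename' matches, break
def pvScanA : List (List (String × String)) → String → String
  | [], _ => ""
  | s :: rest, filename =>
    if pvLookup s "filename" == some filename then
      pvProc ((pvLookup s "chunk_text").getD "")
    else pvScanA rest filename

def format_unused_sources_py (unused_nums : List Int) (sources_list : List (List (String × String))) (citation_map : List (String × Int)) (metadata : Option (List (String × List (String × String)))) : String :=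
  if unused_nums.isEmpty then "All sources have been used."
  else
    let num_to_file := pvNumToFile citation_map
    let lines := (PySem.List.slice unused_nums none (some 35)).foldl (fun acc num =>
      let filename := num_to_file.getD num "unknown"
      let title := pvTitle metadata filename
      let sample_text := pvScanA sources_list filename
      let acc := acc ++ ["[" ++ PySem.Int.toStr num ++ "] " ++ title]
      if sample_text ≠ "" then acc ++ ["    Context: " ++ sample_text ++ "..."] else acc) ([] : List String)
    let lines := if unused_nums.length > 35 then
        lines ++ ["\n... and " ++ PySem.Int.toStr ((unused_nums.length : Int) - 35) ++ " more unused sources"]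
      else lines
    PySem.Str.join "\n" lines

-- ===== PORT B =====
-- one pass over sources_list: first-occurrence processed sample per filename
def pvBuildIndex : List (List (String × String)) → PySem.Dict String String → PySem.Dict String String
  | [], acc => acc
  | s :: rest, acc =>
    match pvLookup s "filename" with
    | none => pvBuildIndex rest acc
    | some f =>
      if acc.contains f then pvBuildIndex rest acc
      else pvBuildIndex rest (acc.insert f (pvProc ((pvLookup s "chunk_text").getD "")))

-- block(num): the whole text block for one number (head, plus context line if any)
def pvBlock (num_to_file : PySem.Dict Int String) (sample_by_file : PySem.Dict String String)
    (metadata : Option (List (String × List (String × String)))) (num : Int) : String :=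
  let filename := num_to_file.getD num "unknown"
  let title := pvTitle metadata filename
  let sample := sample_by_file.getD filename ""
  let head := "[" ++ PySem.Int.toStr num ++ "] " ++ title
  if sample ≠ "" then head ++ "\n    Context: " ++ sample ++ "..." else head

-- rec(nums): the report built back-to-front by direct string concatenation
def pvRec (num_to_file : PySem.Dict Int String) (sample_by_file : PySem.Dict String String)
    (metadata : Option (List (String × List (String × String)))) : List Int → String
  | [] => ""
  | [n] => pvBlock num_to_file sample_by_file metadata n
  | n :: m :: rest =>
    pvBlock num_to_file sample_by_file metadata n ++ "\n" ++
      pvRec num_to_file sample_by_file metadata (m :: rest)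

def format_unused_sources_py_alt (unused_nums : List Int) (sources_list : List (List (String × String))) (citation_map : List (String × Int)) (metadata : Option (List (String × List (String × String)))) : String :=
  if unused_nums.isEmpty then "All sources have been used."
  else
    let num_to_file := pvNumToFile citation_map
    let sample_by_file := pvBuildIndex sources_list PySem.Dict.empty
    let text := pvRec num_to_file sample_by_file metadata (PySem.List.slice unused_nums none (some 35))
    if unused_nums.length > 35 then
      text ++ "\n\n... and " ++ PySem.Int.toStr ((unused_nums.length : Int) - 35) ++ " more unused sources"
    else text

-- ===== PRECONDITION & SPEC =====
def Spec_format_unused_sources_py (unused_nums : List Int) (sources_list : List (List (String × String))) (citation_map : List (String × Int)) (metadata : Option (List (String × List (String × String)))) (out : String) : Prop := out = format_unused_sources_py_alt unused_nums sources_list citation_map metadata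
instance (unused_nums : List Int) (sources_list : List (List (String × String))) (citation_map : List (String × Int)) (metadata : Option (List (String × List (String × String)))) (out : String) : Decidable (Spec_format_unused_sources_py unused_nums sources_list citation_map metadata out) := by unfold Spec_format_unused_sources_py; infer_instance

-- ===== CLAIM (what is proved, stated in full; the proofs are below) =====
def Claim_equal_format_unused_sources_py : Prop := ∀ (unused_nums : List Int) (sources_list : List (List (String × String))) (citation_map : List (String × Int)) (metadata : Option (List (String × List (String × String)))), Dom_format_unused_sources_py unused_nums sources_list citation_map metadata → Spec_format_unused_sources_py unused_nums sources_list citation_map metadata (format_unused_sources_py unused_nums sources_list citation_map metadata)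

-- ===== LEMMAS AND PROOFS =====
-- the entry lines A's loop appends for one number (proof-only helper)
def pvEntries (num_to_file : PySem.Dict Int String) (sample_by_file : PySem.Dict String String)
    (metadata : Option (List (String × List (String × String)))) (num : Int) : List String :=
  let filename := num_to_file.getD num "unknown"
  let title := pvTitle metadata filename
  let sample := sample_by_file.getD filename ""
  ("[" ++ PySem.Int.toStr num ++ "] " ++ title) ::
    (if sample ≠ "" then ["    Context: " ++ sample ++ "..."] else [])

-- the index lookup equals A's break-on-first-match scan
theorem pvBuildIndex_getD (sources : List (List (String × String))) (f : String) :
    ∀ acc : PySem.Dict String String,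
      (pvBuildIndex sources acc).getD f "" =
        if acc.contains f then acc.getD f "" else pvScanA sources f := by
  induction sources with
  | nil =>
    intro acc
    by_cases h : acc.contains f
    · simp [pvBuildIndex, h]
    · simp only [pvBuildIndex, pvScanA, h]
      exact PySem.Dict.getD_of_not_contains acc "" (by simpa using h)
  | cons s rest ih =>
    intro acc
    simp only [pvBuildIndex, pvScanA]
    cases hf : pvLookup s "filename" with
    | none =>
      rw [ih]
      have hb : ((none : Option String) == some f) = false := rfl
      simp [hb]
    | some g =>
      have hbeq : ((some g : Option String) == some f) = (g == f) := rfl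
      dsimp only
      by_cases hc : acc.contains g
      · rw [if_pos hc, ih, hbeq]
        by_cases hgf : g = f
        · subst hgf; simp [hc]
        · simp [hgf]
      · rw [if_neg hc, ih, hbeq]
        by_cases hgf : g = f
        · subst hgf
          simp [PySem.Dict.getD_insert_self, hc]
        · have hne : f ≠ g := Ne.symm hgf
          have h1 := PySem.Dict.contains_insert acc g f (pvProc ((pvLookup s "chunk_text").getD ""))
          have h2 := PySem.Dict.getD_insert_of_ne acc (pvProc ((pvLookup s "chunk_text").getD "")) "" hne
          rw [h1, h2]
          simp [hne, hgf]

theorem pvBuildIndex_empty_getD (sources : List (List (String × String))) (f : String) :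
    (pvBuildIndex sources PySem.Dict.empty).getD f "" = pvScanA sources f := by
  rw [pvBuildIndex_getD]
  simp [PySem.Dict.contains_empty]

-- '\n'.join over a cons, lifted from Chars to String
theorem strjoin_cons_cons (p q : String) (rest : List String) :
    PySem.Str.join "\n" (p :: q :: rest) = p ++ "\n" ++ PySem.Str.join "\n" (q :: rest) := by
  apply String.toList_inj.mp
  simp [PySem.Str.toList_join, PySem.Chars.join_cons_cons]

theorem strjoin_singleton (p : String) : PySem.Str.join "\n" [p] = p := by
  apply String.toList_inj.mp
  simp [PySem.Str.toList_join, PySem.Chars.join_singleton]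

-- '\n'.join splits across a concatenation of two nonempty line lists
theorem strjoin_append (xs ys : List String) (hx : xs ≠ []) (hy : ys ≠ []) :
    PySem.Str.join "\n" (xs ++ ys) = PySem.Str.join "\n" xs ++ "\n" ++ PySem.Str.join "\n" ys := by
  induction xs with
  | nil => exact absurd rfl hx
  | cons x xs ih =>
    cases xs with
    | nil =>
      cases ys with
      | nil => exact absurd rfl hy
      | cons y ys => simp only [List.singleton_append, strjoin_cons_cons, strjoin_singleton]
    | cons x' xs' =>
      have h := ih (by simp)
      simp only [List.cons_append] at h ⊢
      rw [strjoin_cons_cons x x' (xs' ++ ys), strjoin_cons_cons x x' xs', h]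
      simp [String.append_assoc]

-- one block equals the join of that number's entry lines
theorem pvBlock_eq_join (ntf : PySem.Dict Int String) (sbf : PySem.Dict String String)
    (m : Option (List (String × List (String × String)))) (n : Int) :
    pvBlock ntf sbf m n = PySem.Str.join "\n" (pvEntries ntf sbf m n) := by
  unfold pvBlock pvEntries
  dsimp only
  split_ifs with hs
  · rw [strjoin_cons_cons, strjoin_singleton]
    apply String.toList_inj.mp
    simp [String.append_assoc]
  · rw [strjoin_singleton]

theorem pvEntries_ne_nil (ntf : PySem.Dict Int String) (sbf : PySem.Dict String String)
    (m : Option (List (String × List (String × String)))) (n : Int) :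
    pvEntries ntf sbf m n ≠ [] := by
  unfold pvEntries; simp

theorem flatMap_entries_ne_nil (ntf : PySem.Dict Int String) (sbf : PySem.Dict String String)
    (m : Option (List (String × List (String × String)))) (l : List Int) (hl : l ≠ []) :
    l.flatMap (pvEntries ntf sbf m) ≠ [] := by
  cases l with
  | nil => exact absurd rfl hl
  | cons n rest =>
    simp only [List.flatMap_cons, ne_eq, List.append_eq_nil_iff, not_and]
    intro h
    exact absurd h (pvEntries_ne_nil ntf sbf m n)

-- the recursive builder equals '\n'.join of all entry lines
theorem pvRec_eq_join (ntf : PySem.Dict Int String) (sbf : PySem.Dict String String)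
    (m : Option (List (String × List (String × String)))) (l : List Int) (hl : l ≠ []) :
    pvRec ntf sbf m l = PySem.Str.join "\n" (l.flatMap (pvEntries ntf sbf m)) := by
  induction l with
  | nil => exact absurd rfl hl
  | cons n rest ih =>
    cases rest with
    | nil => simp [pvRec, pvBlock_eq_join]
    | cons n' rest' =>
      simp only [pvRec]
      rw [pvBlock_eq_join, ih (by simp),
        ← strjoin_append _ _ (pvEntries_ne_nil ntf sbf m n)
          (flatMap_entries_ne_nil ntf sbf m (n' :: rest') (by simp))]
      simp [List.flatMap_cons]

-- ===== VERDICT (by name: the statement is the Claim_ definition above) =====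
theorem format_unused_sources_py_spec : Claim_equal_format_unused_sources_py := by
  unfold Claim_equal_format_unused_sources_py
  intro u s c m _
  unfold Spec_format_unused_sources_py
  unfold format_unused_sources_py format_unused_sources_py_alt
  by_cases h : u.isEmpty
  · simp [h]
  · simp only [h, if_false, Bool.false_eq_true]
    have hslice : PySem.List.slice u none (some 35) ≠ [] := by
      have hu : u ≠ [] := by simpa [List.isEmpty_iff] using h
      rw [PySem.List.slice_to u (by norm_num : (0:Int) ≤ 35)]
      cases u with
      | nil => exact absurd rfl hu
      | cons a l => simp
    have hfun : (fun (acc : List String) (num : Int) =>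
        let filename := (pvNumToFile c).getD num "unknown"
        let title := pvTitle m filename
        let sample_text := pvScanA s filename
        let acc := acc ++ ["[" ++ PySem.Int.toStr num ++ "] " ++ title]
        if sample_text ≠ "" then acc ++ ["    Context: " ++ sample_text ++ "..."] else acc)
        = (fun (acc : List String) (num : Int) =>
            acc ++ pvEntries (pvNumToFile c) (pvBuildIndex s PySem.Dict.empty) m num) := by
      funext acc num
      simp only [pvEntries, pvBuildIndex_empty_getD]
      by_cases hs : pvScanA s ((pvNumToFile c).getD num "unknown") ≠ ""
      · simp [hs, List.append_assoc]
      · simp [hs]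
    rw [hfun, PySem.List.foldl_append_eq_flatMap]
    simp only [List.nil_append]
    by_cases hlen : u.length > 35
    · simp only [hlen, if_true]
      rw [strjoin_append _ _
        (flatMap_entries_ne_nil _ _ _ _ hslice) (by simp),
        strjoin_singleton, ← pvRec_eq_join _ _ _ _ hslice]
      apply String.toList_inj.mp
      simp [String.append_assoc]
    · simp only [hlen, if_false]
      exact (pvRec_eq_join _ _ _ _ hslice).symm
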